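-- pv_equiv track=rewrite | github.com/amtsu/team22 | users/kaanikin/exercise/hw4/hw4.py | check_fibonacci_numbers
-- ===== SOURCE A (Python) =====
-- def check_fibonacci_numbers(my_list):
--     """
--     Задание 4. Дана последовательности чисел Фибоначчи из нескольких элементов:
--     0, 1, 1, 2, 3, 5, 8, 13, 21, 34, 55, 89, 144, 233, 377, 610, 987, 1597, 2584, 4181, 6765, 10946, 17711
--
--     - Создайте список fibonacci_list, элементами которого будут числа Фибонначи из задания.
--     - Посчитайте и выведите на экран, сколько чисел Фибоначчи в последовательности из задания
--     - Посчитайте и выведите на экран, сколько раз число 1 входит в заданную последовательность Фибоначчи.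
--     - Проверьте и выведите на экран результат, является ли число 21 числом Фибоначчи. Число 33? Число 987? число 9999? использование оператора if возможно, но не является необходимым
--     """
--
--     fib_number = len(my_list)  #Посчитайте и выведите на экран, сколько чисел Фибоначчи в последовательности из задания
--
--
--     one_value = 0         #Посчитайте и выведите на экран, сколько раз число 1 входит в заданную последовательность Фибоначч
--     for i in range(fib_number):
--         if my_list[i] == 1:
--             one_value +=1
--
--
--     question_value = [21, 33 , 987, 9999]  #Проверьте и выведите на экран результат, является ли число 21 числом Фибоначчи. Число 33? Число 987? число 9999? использование оператора if возможно, но не является необходимым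
--     result_question = {}
--     for elem in question_value:
--         if elem in my_list:
--             result_question[elem] = True
--
--         else: result_question[elem] = False
--
--     return fib_number, one_value, result_question
-- ===== SOURCE B (Python) =====
-- def check_fibonacci_numbers(my_list):
--     one_value = 0
--     found = {21: False, 33: False, 987: False, 9999: False}
--     for x in my_list:
--         if x == 1:
--             one_value += 1
--         if x in found and not found[x]:
--             found[x] = True
--     return len(my_list), one_value, found
-- ===== Notes on version B (the rewrite author's own statement) =====
-- stated objective: alternative
-- what changed: Replaces A's index loop plus four independent membership scans of the list with a single pass over the elements that simultaneously counts ones and flips the four pre-initialised dict flags.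
import Mathlib
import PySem

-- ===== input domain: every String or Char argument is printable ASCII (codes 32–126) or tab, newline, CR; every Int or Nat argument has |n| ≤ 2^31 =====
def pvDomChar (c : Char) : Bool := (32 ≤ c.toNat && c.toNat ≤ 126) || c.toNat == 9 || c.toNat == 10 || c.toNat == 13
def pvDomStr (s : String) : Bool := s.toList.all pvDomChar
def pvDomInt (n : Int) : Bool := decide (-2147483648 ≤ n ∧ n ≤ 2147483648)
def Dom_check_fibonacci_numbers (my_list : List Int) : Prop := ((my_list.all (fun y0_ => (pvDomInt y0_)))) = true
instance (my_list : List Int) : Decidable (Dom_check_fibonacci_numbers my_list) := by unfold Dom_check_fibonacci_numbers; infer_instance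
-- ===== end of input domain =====

-- B makes one pass over the list, counting ones and flipping four pre-initialised
-- dict flags, instead of A's index loop plus four independent membership scans (objective: alternative).

-- ===== PORT A =====
def check_fibonacci_numbers (my_list : List Int) : Int × Int × (List (Int × Bool)) :=
  let fib_number : Int := my_list.length
  let one_value : Int :=
    (PySem.List.pyRange 0 fib_number 1).foldl
      (fun acc i => if PySem.List.pyGetD my_list i 0 = 1 then acc + 1 else acc) 0
  let question_value : List Int := [21, 33, 987, 9999]
  let result_question : PySem.Dict Int Bool :=
    question_value.foldl
      (fun d e => if my_list.contains e then d.insert e true else d.insert e false)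
      PySem.Dict.empty
  (fib_number, one_value, result_question.items)

-- ===== PORT B =====
def check_fibonacci_numbers_alt (my_list : List Int) : Int × Int × (List (Int × Bool)) :=
  let init : PySem.Dict Int Bool :=
    PySem.Dict.ofList [(21, false), (33, false), (987, false), (9999, false)]
  let st : Int × PySem.Dict Int Bool :=
    my_list.foldl
      (fun (st : Int × PySem.Dict Int Bool) x =>
        let one := if x = 1 then st.1 + 1 else st.1
        let d := if st.2.contains x && !(st.2.getD x false) then st.2.insert x true else st.2
        (one, d))
      (0, init)
  ((my_list.length : Int), st.1, st.2.items)

-- ===== PRECONDITION & SPEC =====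
def Spec_check_fibonacci_numbers (my_list : List Int) (out : Int × Int × (List (Int × Bool))) : Prop := out = check_fibonacci_numbers_alt my_list
instance (my_list : List Int) (out : Int × Int × (List (Int × Bool))) : Decidable (Spec_check_fibonacci_numbers my_list out) := by unfold Spec_check_fibonacci_numbers; infer_instance

-- ===== CLAIM (what is proved, stated in full; the proofs are below) =====
def Claim_equal_check_fibonacci_numbers : Prop := ∀ (my_list : List Int), Dom_check_fibonacci_numbers my_list → Spec_check_fibonacci_numbers my_list (check_fibonacci_numbers my_list)

-- ===== LEMMAS AND PROOFS =====

-- B's paired fold splits into an independent count fold and dict fold.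
lemma pvFoldB_split (l : List Int) (o : Int) (d : PySem.Dict Int Bool) :
    l.foldl
      (fun (st : Int × PySem.Dict Int Bool) x =>
        let one := if x = 1 then st.1 + 1 else st.1
        let d := if st.2.contains x && !(st.2.getD x false) then st.2.insert x true else st.2
        (one, d))
      (o, d)
    = (l.foldl (fun acc x => if x = 1 then acc + 1 else acc) o,
       l.foldl (fun d x => if d.contains x && !(d.getD x false) then d.insert x true else d) d) := by
  induction l generalizing o d with
  | nil => rfl
  | cons x l ih => simp only [List.foldl_cons, ih]

-- One step of B's dict loop on the four-key literal dict ORs the matching flag.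
lemma pvStepB (a b c e : Bool) (x : Int) :
    (if (PySem.Dict.mk [(21, a), (33, b), (987, c), (9999, e)] : PySem.Dict Int Bool).contains x
        && !((PySem.Dict.mk [(21, a), (33, b), (987, c), (9999, e)] : PySem.Dict Int Bool).getD x false)
     then (PySem.Dict.mk [(21, a), (33, b), (987, c), (9999, e)] : PySem.Dict Int Bool).insert x true
     else PySem.Dict.mk [(21, a), (33, b), (987, c), (9999, e)])
    = PySem.Dict.mk [(21, a || decide (x = 21)), (33, b || decide (x = 33)),
                     (987, c || decide (x = 987)), (9999, e || decide (x = 9999))] := by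
  by_cases h21 : x = 21
  · subst h21; cases a <;> apply PySem.Dict.ext <;>
      simp [PySem.Dict.contains, PySem.Dict.getD, PySem.Dict.get?, PySem.Dict.insert]
  · by_cases h33 : x = 33
    · subst h33; cases b <;> apply PySem.Dict.ext <;>
        simp [PySem.Dict.contains, PySem.Dict.getD, PySem.Dict.get?, PySem.Dict.insert]
    · by_cases h987 : x = 987
      · subst h987; cases c <;> apply PySem.Dict.ext <;>
          simp [PySem.Dict.contains, PySem.Dict.getD, PySem.Dict.get?, PySem.Dict.insert]
      · by_cases h9999 : x = 9999
        · subst h9999; cases e <;> apply PySem.Dict.ext <;>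
            simp [PySem.Dict.contains, PySem.Dict.getD, PySem.Dict.get?, PySem.Dict.insert]
        · have hc : (PySem.Dict.mk [(21, a), (33, b), (987, c), (9999, e)] : PySem.Dict Int Bool).contains x = false := by
            simp [PySem.Dict.contains]
            exact ⟨fun h => h21 h.symm, fun h => h33 h.symm, fun h => h987 h.symm,
                   fun h => h9999 h.symm⟩
          rw [hc]
          simp [h21, h33, h987, h9999]

-- B's dict fold over the four-key literal dict flips each flag iff the key occurs in l.
lemma pvFoldB_dict (l : List Int) (a b c e : Bool) :
    (l.foldl (fun (d : PySem.Dict Int Bool) x =>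
        if d.contains x && !(d.getD x false) then d.insert x true else d)
      (PySem.Dict.mk [(21, a), (33, b), (987, c), (9999, e)])).items
    = [(21, a || l.contains 21), (33, b || l.contains 33),
       (987, c || l.contains 987), (9999, e || l.contains 9999)] := by
  induction l generalizing a b c e with
  | nil => simp
  | cons x l ih =>
    rw [List.foldl_cons, pvStepB, ih]
    simp [Bool.or_assoc, eq_comm]

-- Four fresh-key inserts into the empty dict append their pairs in order.
lemma pvInsert4 (v1 v2 v3 v4 : Bool) :
    (((((PySem.Dict.empty : PySem.Dict Int Bool).insert 21 v1).insert 33 v2).insert 987 v3).insert 9999 v4).items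
      = [(21, v1), (33, v2), (987, v3), (9999, v4)] := by
  cases v1 <;> cases v2 <;> cases v3 <;> cases v4 <;> rfl

-- A's four-step membership loop produces the same literal items list.
lemma pvFoldA_dict (my_list : List Int) :
    (([21, 33, 987, 9999] : List Int).foldl
      (fun (d : PySem.Dict Int Bool) e =>
        if my_list.contains e then d.insert e true else d.insert e false)
      PySem.Dict.empty).items
    = [(21, my_list.contains 21), (33, my_list.contains 33),
       (987, my_list.contains 987), (9999, my_list.contains 9999)] := by
  have hif : ∀ (d : PySem.Dict Int Bool) (e : Int),
      (if my_list.contains e then d.insert e true else d.insert e false)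
        = d.insert e (my_list.contains e) := by
    intro d e; cases h : my_list.contains e <;> simp
  simp only [List.foldl_cons, List.foldl_nil, hif]
  exact pvInsert4 _ _ _ _

-- ===== VERDICT (by name: the statement is the Claim_ definition above) =====
theorem check_fibonacci_numbers_spec : Claim_equal_check_fibonacci_numbers := by
  intro my_list _
  unfold Spec_check_fibonacci_numbers check_fibonacci_numbers check_fibonacci_numbers_alt
  have hof : (PySem.Dict.ofList [(21, false), (33, false), (987, false), (9999, false)] : PySem.Dict Int Bool)
      = PySem.Dict.mk [(21, false), (33, false), (987, false), (9999, false)] := rfl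
  simp only [pvFoldB_split, pvFoldA_dict, hof, pvFoldB_dict, Bool.false_or]
  rw [PySem.List.foldl_pyRange_zero_pyGetD' my_list 0
    (fun acc v => if v = 1 then acc + 1 else acc) 0]
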